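-- pv_equiv track=rewrite | github.com/AlanForester/IQOption-Bot-Trade-System | src/yogaMerchant/helpers/fibonacci.py | get_uniq_unsigned_array
-- ===== SOURCE A (Python) =====
-- def get_uniq_unsigned_array(dimension):
--     """Возвращяет массив фибоначи с уникальными значениями"""
--     output = [0]
--
--     unsigned = dimension
--     fib1 = 0
--     fib2 = 1
--     while unsigned > 0:
--         fib_sum = fib2 + fib1
--         output.append(-fib_sum)
--         fib1 = fib2
--         fib2 = fib_sum
--         unsigned -= 1
--     output.reverse()
--
--     signed = dimension
--     fib1 = 0
--     fib2 = 1
--     while signed > 0: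
--         fib_sum = fib2 + fib1
--         output.append(fib_sum)
--         fib1 = fib2
--         fib2 = fib_sum
--         signed -= 1
--     return output
-- ===== SOURCE B (Python) =====
-- def get_uniq_unsigned_array(dimension):
--     """Возвращяет массив фибоначи с уникальными значениями"""
--     fibs = []
--     fib1, fib2 = 0, 1
--     n = dimension
--     while n > 0:
--         fib1, fib2 = fib2, fib2 + fib1
--         fibs.append(fib2)
--         n -= 1
--     return [-x for x in reversed(fibs)] + [0] + fibs
-- ===== Notes on version B (the rewrite author's own statement) =====
-- stated objective: simpler
-- what changed: B generates the Fibonacci core sequence once and assembles the result as negated-reversed list + [0] + list, replacing A's two separate Fibonacci loops plus an in-place reverse.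
import Mathlib
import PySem

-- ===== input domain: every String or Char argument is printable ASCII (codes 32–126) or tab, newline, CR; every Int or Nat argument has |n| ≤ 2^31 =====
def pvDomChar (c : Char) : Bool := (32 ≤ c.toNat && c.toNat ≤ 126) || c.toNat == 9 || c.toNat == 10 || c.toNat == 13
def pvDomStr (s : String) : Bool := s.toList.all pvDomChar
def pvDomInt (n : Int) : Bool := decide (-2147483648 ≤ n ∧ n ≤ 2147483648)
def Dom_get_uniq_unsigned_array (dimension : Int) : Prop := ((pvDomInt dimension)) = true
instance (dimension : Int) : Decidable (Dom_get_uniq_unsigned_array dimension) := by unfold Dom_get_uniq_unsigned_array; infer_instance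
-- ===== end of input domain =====

-- B builds the Fibonacci core once and mirrors it (negated-reversed ++ [0] ++ core); objective: simpler.
-- ===== PORT A =====
-- while unsigned > 0: append -(fib2+fib1), shift fibs, decrement
def pvNegLoop (unsigned fib1 fib2 : Int) (output : List Int) : List Int :=
  if unsigned > 0 then
    pvNegLoop (unsigned - 1) fib2 (fib2 + fib1) (output ++ [-(fib2 + fib1)])
  else output
termination_by unsigned.toNat
decreasing_by omega

-- while signed > 0: append fib2+fib1, shift fibs, decrement
def pvPosLoop (signed fib1 fib2 : Int) (output : List Int) : List Int :=
  if signed > 0 then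
    pvPosLoop (signed - 1) fib2 (fib2 + fib1) (output ++ [fib2 + fib1])
  else output
termination_by signed.toNat
decreasing_by omega

def get_uniq_unsigned_array (dimension : Int) : List Int :=
  pvPosLoop dimension 0 1 ((pvNegLoop dimension 0 1 [0]).reverse)

-- ===== PORT B =====
-- the single generation pass of Source B: while n > 0: shift fibs, emit fib2
def pvGenFibs (n fib1 fib2 : Int) : List Int :=
  if n > 0 then (fib2 + fib1) :: pvGenFibs (n - 1) fib2 (fib2 + fib1) else []
termination_by n.toNat
decreasing_by omega

def get_uniq_unsigned_array_alt (dimension : Int) : List Int :=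
  let fibs := pvGenFibs dimension 0 1
  (fibs.reverse.map (fun x => -x)) ++ [0] ++ fibs

-- ===== PRECONDITION & SPEC =====
def Spec_get_uniq_unsigned_array (dimension : Int) (out : List Int) : Prop := out = get_uniq_unsigned_array_alt dimension
instance (dimension : Int) (out : List Int) : Decidable (Spec_get_uniq_unsigned_array dimension out) := by unfold Spec_get_uniq_unsigned_array; infer_instance

-- ===== CLAIM (what is proved, stated in full; the proofs are below) =====
def Claim_equal_get_uniq_unsigned_array : Prop := ∀ (dimension : Int), Dom_get_uniq_unsigned_array dimension → Spec_get_uniq_unsigned_array dimension (get_uniq_unsigned_array dimension)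

-- ===== LEMMAS AND PROOFS =====

lemma pvNegLoop_eq (n f1 f2 : Int) (out : List Int) :
    pvNegLoop n f1 f2 out = out ++ (pvGenFibs n f1 f2).map (fun x => -x) := by
  fun_induction pvNegLoop n f1 f2 out with
  | case1 n f1 f2 out h ih =>
    rw [ih]; conv_rhs => rw [pvGenFibs, if_pos h]
    simp
  | case2 n f1 f2 out h =>
    rw [pvGenFibs, if_neg h]; simp

lemma pvPosLoop_eq (n f1 f2 : Int) (out : List Int) :
    pvPosLoop n f1 f2 out = out ++ pvGenFibs n f1 f2 := by
  fun_induction pvPosLoop n f1 f2 out with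
  | case1 n f1 f2 out h ih =>
    rw [ih]; conv_rhs => rw [pvGenFibs, if_pos h]
    simp
  | case2 n f1 f2 out h =>
    rw [pvGenFibs, if_neg h]; simp

-- ===== VERDICT (by name: the statement is the Claim_ definition above) =====
theorem get_uniq_unsigned_array_spec : Claim_equal_get_uniq_unsigned_array := by
  intro d _
  show get_uniq_unsigned_array d = get_uniq_unsigned_array_alt d
  simp [get_uniq_unsigned_array, get_uniq_unsigned_array_alt,
        pvNegLoop_eq, pvPosLoop_eq, List.map_reverse]
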